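-- pv_equiv track=rewrite | github.com/DKorolski/mean_rev_strategy | opt_scripts/mean_rev_0_opt_short_stop_take.py | max_consecutive_runs
-- ===== SOURCE A (Python) =====
-- def max_consecutive_runs(bool_array, value=True):
--     """
--     Считает максимальное количество подряд идущих значений (True или False)
--     в булевом массиве.
--     """
--     max_streak = 0
--     current_streak = 0
--     for x in bool_array:
--         if x == value:
--             current_streak += 1
--             max_streak = max(max_streak, current_streak)
--         else:
--             current_streak = 0
--     return max_streak
-- ===== SOURCE B (Python) =====
-- from itertools import groupby
--
-- def max_consecutive_runs(bool_array, value=True):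
--     return max((sum(1 for _ in g) for k, g in groupby(bool_array) if k == value),
--                default=0)
-- ===== Notes on version B (the rewrite author's own statement) =====
-- stated objective: idiomatic
-- what changed: Replaces the running-counter-with-branches loop by itertools.groupby: split the array into maximal runs of equal elements, then take the max length over runs whose key equals value (default 0).
import Mathlib
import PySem

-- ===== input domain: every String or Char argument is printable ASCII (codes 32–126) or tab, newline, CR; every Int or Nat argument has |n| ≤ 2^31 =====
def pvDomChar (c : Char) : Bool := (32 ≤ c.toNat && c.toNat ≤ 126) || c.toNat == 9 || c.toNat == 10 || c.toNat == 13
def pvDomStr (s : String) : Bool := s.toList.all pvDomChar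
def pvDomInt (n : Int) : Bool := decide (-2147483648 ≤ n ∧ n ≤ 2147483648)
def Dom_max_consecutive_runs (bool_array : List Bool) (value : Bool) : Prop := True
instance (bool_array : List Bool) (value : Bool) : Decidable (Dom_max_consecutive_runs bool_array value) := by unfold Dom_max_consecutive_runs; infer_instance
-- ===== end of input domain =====

-- ===== PORT A =====
-- Port of A: left fold carrying (max_streak, current_streak), branches in source order.
def max_consecutive_runs (bool_array : List Bool) (value : Bool) : Int :=
  (bool_array.foldl
    (fun (p : Int × Int) x =>
      if x == value then (max p.1 (p.2 + 1), p.2 + 1) else (p.1, 0))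
    (0, 0)).1

-- ===== PORT B =====
-- Port of B: itertools.groupby as an explicit run-length grouping (exact for grouping
-- adjacent equal elements), then the max (default 0) over lengths of matching runs.
def pvRuns : List Bool → List (Bool × Int)
  | [] => []
  | x :: xs =>
    match pvRuns xs with
    | (k, n) :: rest => if x == k then (k, n + 1) :: rest else (x, 1) :: (k, n) :: rest
    | [] => [(x, 1)]

def pvMaxMatch (value : Bool) : List (Bool × Int) → Int
  | [] => 0
  | (k, n) :: rest => if k == value then max n (pvMaxMatch value rest) else pvMaxMatch value rest

def max_consecutive_runs_alt (bool_array : List Bool) (value : Bool) : Int :=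
  pvMaxMatch value (pvRuns bool_array)

-- ===== PRECONDITION & SPEC =====
def Spec_max_consecutive_runs (bool_array : List Bool) (value : Bool) (out : Int) : Prop := out = max_consecutive_runs_alt bool_array value
instance (bool_array : List Bool) (value : Bool) (out : Int) : Decidable (Spec_max_consecutive_runs bool_array value out) := by unfold Spec_max_consecutive_runs; infer_instance

-- ===== CLAIM (what is proved, stated in full; the proofs are below) =====
def Claim_equal_max_consecutive_runs : Prop := ∀ (bool_array : List Bool) (value : Bool), Dom_max_consecutive_runs bool_array value → Spec_max_consecutive_runs bool_array value (max_consecutive_runs bool_array value)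

-- ===== LEMMAS AND PROOFS =====

-- ===== VERDICT (by name: the statement is the Claim_ definition above) =====
-- maximum streak of `value` in the list, given a current streak credit `cs`
def mw (value : Bool) (cs : Int) : List Bool → Int
  | [] => 0
  | x :: xs => if x == value then max (cs + 1) (mw value (cs + 1) xs) else mw value 0 xs

theorem pvMaxMatch_nonneg (value : Bool) : ∀ (rl : List (Bool × Int)), 0 ≤ pvMaxMatch value rl
  | [] => le_rfl
  | (k, n) :: rest => by
    have := pvMaxMatch_nonneg value rest
    by_cases hk : k == value <;> simp [pvMaxMatch, hk] <;> omega

theorem pvRuns_pos : ∀ (l : List Bool) (p : Bool × Int), p ∈ pvRuns l → 1 ≤ p.2 := by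
  intro l
  induction l with
  | nil => intro p hp; simp [pvRuns] at hp
  | cons x xs ih =>
    intro p hp
    simp only [pvRuns] at hp
    cases h : pvRuns xs with
    | nil => rw [h] at hp; simp at hp; simp [hp]
    | cons q r =>
      obtain ⟨k, n⟩ := q
      rw [h] at hp
      by_cases hx : x == k
      · simp [hx] at hp
        rcases hp with hp | hp
        · have := ih (k, n) (by rw [h]; exact List.mem_cons_self)
          simp at this ⊢
          simp [hp]; omega
        · exact ih p (by rw [h]; exact List.mem_cons_of_mem _ hp)
      · simp [hx] at hp
        rcases hp with hp | hp | hp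
        · simp [hp]
        · rw [hp]
          exact ih (k, n) (by rw [h]; exact List.mem_cons_self ..)
        · exact ih p (by rw [h]; exact List.mem_cons_of_mem _ hp)

theorem mw_runs (value : Bool) : ∀ (l : List Bool) (cs : Int), 0 ≤ cs →
    mw value cs l = (match pvRuns l with
      | [] => 0
      | (k, n) :: rest => if k == value then max (cs + n) (pvMaxMatch value rest)
                          else pvMaxMatch value ((k, n) :: rest)) := by
  intro l
  induction l with
  | nil => intro cs _; simp [mw, pvRuns]
  | cons x xs ih =>
    intro cs hcs
    simp only [mw, pvRuns]
    cases h : pvRuns xs with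
    | nil =>
      have h1 := ih (cs + 1) (by omega)
      have h2 := ih 0 le_rfl
      rw [h] at h1 h2
      by_cases hx : x == value <;> simp [hx, h1, h2, pvMaxMatch] <;> omega
    | cons q r =>
      obtain ⟨k, n⟩ := q
      have hn : 1 ≤ n := pvRuns_pos xs (k, n) (by rw [h]; exact List.mem_cons_self)
      by_cases hx : x == value
      · have heq : x = value := by simpa using hx
        have ihx := ih (cs + 1) (by omega)
        rw [h] at ihx
        by_cases hk : x == k
        · have hkv : (k == value) = true := by simp_all
          simp only [hx, if_pos, hk, hkv] at ihx ⊢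
          simp only [ihx]
          have hm : cs + 1 ≤ max (cs + 1 + n) (pvMaxMatch value r) :=
            le_trans (by omega) (le_max_left _ _)
          rw [max_eq_right hm]
          have hr : cs + (n + 1) = cs + 1 + n := by ring
          rw [hr]
        · have hkv : (k == value) = false := by
            cases k <;> cases value <;> cases x <;> simp_all
          simp only [hx, hk, hkv, if_pos, if_neg, if_false, Bool.false_eq_true] at ihx ⊢
          simp [ihx, pvMaxMatch, hkv]
      · have ihx := ih 0 (le_rfl)
        rw [h] at ihx
        by_cases hk : x == k
        · have hkv : (k == value) = false := by
            cases k <;> cases value <;> cases x <;> simp_all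
          simp only [hx, hk, hkv, Bool.false_eq_true, if_false, if_pos] at ihx ⊢
          simp [ihx, pvMaxMatch, hkv]
        · simp only [hx, hk, Bool.false_eq_true, if_false] at ihx ⊢
          simp [ihx, pvMaxMatch]
          have hxv : x ≠ value := by simpa using hx
          by_cases hkv : k = value <;> simp [hkv, hxv]

theorem foldl_mw (value : Bool) : ∀ (l : List Bool) (ms cs : Int), 0 ≤ cs → cs ≤ ms →
    (l.foldl (fun (p : Int × Int) x =>
      if x == value then (max p.1 (p.2 + 1), p.2 + 1) else (p.1, 0)) (ms, cs)).1
    = max ms (mw value cs l) := by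
  intro l
  induction l with
  | nil => intro ms cs h0 h1; simp [mw]; omega
  | cons x xs ih =>
    intro ms cs h0 h1
    simp only [List.foldl_cons, mw]
    by_cases hx : x == value
    · simp only [hx, if_pos]
      rw [ih (max ms (cs + 1)) (cs + 1) (by omega) (by omega)]
      omega
    · simp only [hx, Bool.false_eq_true, if_false]
      rw [ih ms 0 le_rfl (by omega)]

theorem max_consecutive_runs_spec : Claim_equal_max_consecutive_runs := by
  intro l value _
  unfold Spec_max_consecutive_runs max_consecutive_runs max_consecutive_runs_alt
  rw [foldl_mw value l 0 0 le_rfl le_rfl, mw_runs value l 0 le_rfl]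
  cases h : pvRuns l with
  | nil => simp [pvMaxMatch]
  | cons p rest =>
    obtain ⟨k, n⟩ := p
    by_cases hk : k == value <;> simp [pvMaxMatch, hk]
    · exact Or.inr (pvMaxMatch_nonneg value rest)
    · exact pvMaxMatch_nonneg value rest
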